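-- pv_equiv track=rewrite | github.com/molimi/BasicExercise | PythonExercise/April/ex003.py | is_format
-- ===== SOURCE A (Python) =====
-- def is_format(test_str):
--     count_list = [0, 0, 0]
--     pos = 0  # 刚开始默认从P之前开始记录
--     for letter in test_str:
--         if letter == 'A':
--             count_list[pos] += 1  # 分别统计A在不同位置之间出现的次数
--         elif letter == 'P' and pos == 0:  # 出现P之后，把pos置位1
--             pos = 1
--         elif letter == 'T' and pos == 1:  # 出现T之后，把pos置位2
--             pos = 2
--         else:
--             return 'NO'
--     # 判断T是否在P之后出现，P和T之间是否有A，以及T之后A的数量是否等于P&T之间A的数量乘以P前A的数量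
--     if pos == 2 and count_list[1] and count_list[
--             2] == count_list[0] * count_list[1]:
--         return 'YES'
--     else:
--         return 'NO'
-- ===== SOURCE B (Python) =====
-- def is_format(test_str):
--     # structural check via counts/indices instead of a state machine
--     if test_str.count('P') != 1 or test_str.count('T') != 1:
--         return 'NO'
--     p = test_str.index('P')
--     t = test_str.index('T')
--     if t < p or any(ch not in 'APT' for ch in test_str):
--         return 'NO'
--     b = t - p - 1
--     c = len(test_str) - t - 1
--     return 'YES' if b >= 1 and c == p * b else 'NO'
-- ===== Notes on version B (the rewrite author's own statement) =====
-- stated objective: alternative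
-- what changed: Replaces A's single-pass three-counter state machine with structural validation via count/index primitives (exactly one P, exactly one T, P before T, only A/P/T characters) followed by the same arithmetic check on the three segment lengths computed from indices.
import Mathlib
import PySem

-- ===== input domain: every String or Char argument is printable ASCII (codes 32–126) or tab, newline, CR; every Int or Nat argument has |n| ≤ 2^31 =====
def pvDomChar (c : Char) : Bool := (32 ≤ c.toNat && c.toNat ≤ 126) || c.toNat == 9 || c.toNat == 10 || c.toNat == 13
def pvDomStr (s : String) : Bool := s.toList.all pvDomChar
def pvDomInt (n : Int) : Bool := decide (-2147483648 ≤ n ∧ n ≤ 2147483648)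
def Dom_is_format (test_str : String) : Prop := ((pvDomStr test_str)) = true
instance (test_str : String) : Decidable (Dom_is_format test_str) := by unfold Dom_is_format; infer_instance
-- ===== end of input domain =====

-- B replaces A's one-pass three-counter state machine by count/index-based structural
-- parsing plus the same arithmetic check (objective: alternative; both are linear).

-- ===== PORT A =====
-- A's loop: state = (pos, count_list[0], count_list[1], count_list[2]); none = early 'NO'.
def isFmtLoop : List Char → Int → Int → Int → Int → Option (Int × Int × Int × Int)
  | [], pos, c0, c1, c2 => some (pos, c0, c1, c2)
  | ch :: rest, pos, c0, c1, c2 =>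
    if ch = 'A' then
      if pos = 0 then isFmtLoop rest pos (c0 + 1) c1 c2
      else if pos = 1 then isFmtLoop rest pos c0 (c1 + 1) c2
      else isFmtLoop rest pos c0 c1 (c2 + 1)
    else if ch = 'P' ∧ pos = 0 then isFmtLoop rest 1 c0 c1 c2
    else if ch = 'T' ∧ pos = 1 then isFmtLoop rest 2 c0 c1 c2
    else none

def is_format (test_str : String) : String :=
  match isFmtLoop test_str.toList 0 0 0 0 with
  | none => "NO"
  | some (pos, c0, c1, c2) =>
      if pos = 2 ∧ c1 ≠ 0 ∧ c2 = c0 * c1 then "YES" else "NO"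

-- ===== PORT B =====
def is_format_alt (test_str : String) : String :=
  let l := test_str.toList
  if l.count 'P' ≠ 1 ∨ l.count 'T' ≠ 1 then "NO"
  else
    let p : Int := l.idxOf 'P'
    let t : Int := l.idxOf 'T'
    if t < p ∨ l.any (fun ch => !(ch == 'A' || ch == 'P' || ch == 'T')) then "NO"
    else
      let b : Int := t - p - 1
      let c : Int := (l.length : Int) - t - 1
      if 1 ≤ b ∧ c = p * b then "YES" else "NO"

-- ===== PRECONDITION & SPEC =====
def Spec_is_format (test_str : String) (out : String) : Prop := out = is_format_alt test_str
instance (test_str : String) (out : String) : Decidable (Spec_is_format test_str out) := by unfold Spec_is_format; infer_instance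

-- ===== CLAIM (what is proved, stated in full; the proofs are below) =====
def Claim_equal_is_format : Prop := ∀ (test_str : String), Dom_is_format test_str → Spec_is_format test_str (is_format test_str)

-- ===== LEMMAS AND PROOFS =====

-- canonical shape: A^x P A^y T A^z with y ≥ 1 and z = x*y
def PatShape (l : List Char) : Prop :=
  ∃ x y z : Nat, l = List.replicate x 'A' ++ 'P' :: (List.replicate y 'A' ++ 'T' :: List.replicate z 'A')
    ∧ 1 ≤ y ∧ z = x * y

-- "this loop result makes A print YES"
def yesO : Option (Int × Int × Int × Int) → Prop
  | none => False
  | some (pos, c0, c1, c2) => pos = 2 ∧ c1 ≠ 0 ∧ c2 = c0 * c1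

theorem loop2_iff (l : List Char) (c0 c1 c2 : Int) :
    yesO (isFmtLoop l 2 c0 c1 c2) ↔ (∀ c ∈ l, c = 'A') ∧ c1 ≠ 0 ∧ c2 + l.length = c0 * c1 := by
  induction l generalizing c2 with
  | nil => simp [isFmtLoop, yesO]
  | cons ch rest ih =>
    by_cases hA : ch = 'A'
    · subst hA
      have e : isFmtLoop ('A' :: rest) 2 c0 c1 c2 = isFmtLoop rest 2 c0 c1 (c2 + 1) := by
        simp [isFmtLoop]
      rw [e, ih]
      simp only [List.mem_cons, List.length_cons]
      constructor
      · rintro ⟨h1, h2, h3⟩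
        refine ⟨fun c hc => hc.elim (fun h => h) (h1 c), h2, ?_⟩
        push_cast at h3 ⊢; linear_combination h3
      · rintro ⟨h1, h2, h3⟩
        refine ⟨fun c hc => h1 c (Or.inr hc), h2, ?_⟩
        push_cast at h3 ⊢; linear_combination h3
    · have e : isFmtLoop (ch :: rest) 2 c0 c1 c2 = none := by
        simp [isFmtLoop, hA]
      rw [e]
      simp only [yesO, false_iff]
      rintro ⟨h1, -, -⟩
      exact hA (h1 ch (by simp))

theorem loop1_iff (l : List Char) (c0 c1 c2 : Int) :
    yesO (isFmtLoop l 1 c0 c1 c2) ↔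
      ∃ y z : Nat, l = List.replicate y 'A' ++ 'T' :: List.replicate z 'A'
        ∧ c1 + y ≠ 0 ∧ c2 + z = c0 * (c1 + y) := by
  induction l generalizing c1 with
  | nil =>
    have e : isFmtLoop [] 1 c0 c1 c2 = some (1, c0, c1, c2) := rfl
    rw [e]
    constructor
    · rintro ⟨h, -, -⟩; exact absurd h (by norm_num)
    · rintro ⟨y, z, h, -, -⟩
      exact absurd h.symm (by simp)
  | cons ch rest ih =>
    by_cases hA : ch = 'A'
    · subst hA
      have e : isFmtLoop ('A' :: rest) 1 c0 c1 c2 = isFmtLoop rest 1 c0 (c1 + 1) c2 := by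
        simp [isFmtLoop]
      rw [e, ih]
      constructor
      · rintro ⟨y, z, h, h2, h3⟩
        refine ⟨y + 1, z, by simp [List.replicate_succ, h], ?_, ?_⟩
        · push_cast at h2 ⊢; omega
        · push_cast at h3 ⊢; linear_combination h3
      · rintro ⟨y, z, h, h2, h3⟩
        cases y with
        | zero => simp at h
        | succ y' =>
          rw [List.replicate_succ, List.cons_append, List.cons.injEq] at h
          refine ⟨y', z, h.2, ?_, ?_⟩
          · push_cast at h2 ⊢; omega
          · push_cast at h3 ⊢; linear_combination h3
    · by_cases hT : ch = 'T'
      · subst hT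
        have e : isFmtLoop ('T' :: rest) 1 c0 c1 c2 = isFmtLoop rest 2 c0 c1 c2 := by
          simp [isFmtLoop]
        rw [e, loop2_iff]
        constructor
        · rintro ⟨h1, h2, h3⟩
          refine ⟨0, rest.length, ?_, by simpa using h2, by simpa using h3⟩
          simpa using List.eq_replicate_of_mem h1
        · rintro ⟨y, z, h, h2, h3⟩
          cases y with
          | zero =>
            simp only [List.replicate_zero, List.nil_append, List.cons.injEq, true_and] at h
            subst h
            refine ⟨fun c hc => List.eq_of_mem_replicate hc, by simpa using h2, by simpa using h3⟩
          | succ y' => simp [List.replicate_succ] at h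
      · have e : isFmtLoop (ch :: rest) 1 c0 c1 c2 = none := by
          simp [isFmtLoop, hA, hT]
        rw [e]
        simp only [yesO, false_iff]
        rintro ⟨y, z, h, -, -⟩
        cases y with
        | zero =>
          simp only [List.replicate_zero, List.nil_append, List.cons.injEq] at h
          exact hT h.1
        | succ y' =>
          rw [List.replicate_succ, List.cons_append, List.cons.injEq] at h
          exact hA h.1

theorem loop0_iff (l : List Char) (c0 : Int) :
    yesO (isFmtLoop l 0 c0 0 0) ↔
      ∃ x y z : Nat, l = List.replicate x 'A' ++ 'P' :: (List.replicate y 'A' ++ 'T' :: List.replicate z 'A')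
        ∧ (y : Int) ≠ 0 ∧ (z : Int) = (c0 + x) * y := by
  induction l generalizing c0 with
  | nil =>
    have e : isFmtLoop [] 0 c0 0 0 = some (0, c0, 0, 0) := rfl
    rw [e]
    constructor
    · rintro ⟨h, -, -⟩; exact absurd h (by norm_num)
    · rintro ⟨x, y, z, h, -, -⟩
      exact absurd h.symm (by simp)
  | cons ch rest ih =>
    by_cases hA : ch = 'A'
    · subst hA
      have e : isFmtLoop ('A' :: rest) 0 c0 0 0 = isFmtLoop rest 0 (c0 + 1) 0 0 := by
        simp [isFmtLoop]
      rw [e, ih]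
      constructor
      · rintro ⟨x, y, z, h, h2, h3⟩
        refine ⟨x + 1, y, z, by simp [List.replicate_succ, h], h2, ?_⟩
        push_cast at h3 ⊢; linear_combination h3
      · rintro ⟨x, y, z, h, h2, h3⟩
        cases x with
        | zero => simp at h
        | succ x' =>
          rw [List.replicate_succ, List.cons_append, List.cons.injEq] at h
          refine ⟨x', y, z, h.2, h2, ?_⟩
          push_cast at h3 ⊢; linear_combination h3
    · by_cases hP : ch = 'P'
      · subst hP
        have e : isFmtLoop ('P' :: rest) 0 c0 0 0 = isFmtLoop rest 1 c0 0 0 := by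
          simp [isFmtLoop]
        rw [e, loop1_iff]
        constructor
        · rintro ⟨y, z, h, h2, h3⟩
          refine ⟨0, y, z, by simpa using h, by simpa using h2, ?_⟩
          push_cast at h3 ⊢; linear_combination h3
        · rintro ⟨x, y, z, h, h2, h3⟩
          cases x with
          | zero =>
            simp only [List.replicate_zero, List.nil_append, List.cons.injEq, true_and] at h
            refine ⟨y, z, h, by simpa using h2, ?_⟩
            push_cast at h3 ⊢; linear_combination h3
          | succ x' => simp [List.replicate_succ] at h
      · have e : isFmtLoop (ch :: rest) 0 c0 0 0 = none := by
          simp [isFmtLoop, hA, hP]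
        rw [e]
        simp only [yesO, false_iff]
        rintro ⟨x, y, z, h, -, -⟩
        cases x with
        | zero =>
          simp only [List.replicate_zero, List.nil_append, List.cons.injEq] at h
          exact hP h.1
        | succ x' =>
          rw [List.replicate_succ, List.cons_append, List.cons.injEq] at h
          exact hA h.1

theorem A_yes_iff (s : String) : is_format s = "YES" ↔ PatShape s.toList := by
  have hyes : is_format s = "YES" ↔ yesO (isFmtLoop s.toList 0 0 0 0) := by
    unfold is_format
    rcases isFmtLoop s.toList 0 0 0 0 with _ | ⟨p, a, b, c⟩
    · simp [yesO]
    · dsimp only [yesO]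
      split_ifs with hc
      · simp [hc]
      · simp [hc]
  rw [hyes, loop0_iff]
  constructor
  · rintro ⟨x, y, z, h, hy, hz⟩
    refine ⟨x, y, z, h, by exact_mod_cast Nat.one_le_iff_ne_zero.mpr (by exact_mod_cast hy), ?_⟩
    have : (z : Int) = (x : Int) * y := by rw [hz]; ring
    exact_mod_cast this
  · rintro ⟨x, y, z, h, hy, hz⟩
    refine ⟨x, y, z, h, by exact_mod_cast Nat.one_le_iff_ne_zero.mp hy, ?_⟩
    subst hz; push_cast; ring

theorem idxOf_replA_append (n : Nat) (l : List Char) (c : Char) (h : c ≠ 'A') :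
    List.idxOf c (List.replicate n 'A' ++ l) = n + List.idxOf c l := by
  induction n with
  | zero => simp
  | succ m ih =>
    rw [List.replicate_succ, List.cons_append, List.idxOf_cons_ne _ (Ne.symm h), ih]
    omega

-- the structural heart of B: the count/index conditions force the A^x P A^y T A^z shape
theorem conds_pat (l : List Char)
    (hP : l.count 'P' = 1) (hT : l.count 'T' = 1)
    (hall : ∀ ch ∈ l, ch = 'A' ∨ ch = 'P' ∨ ch = 'T')
    (hb : 1 ≤ (l.idxOf 'T' : Int) - (l.idxOf 'P' : Int) - 1)
    (hc : (l.length : Int) - (l.idxOf 'T' : Int) - 1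
          = (l.idxOf 'P' : Int) * ((l.idxOf 'T' : Int) - (l.idxOf 'P' : Int) - 1)) :
    PatShape l := by
  set p := l.idxOf 'P' with hp
  set t := l.idxOf 'T' with ht
  have hPm : 'P' ∈ l := List.count_pos_iff.mp (by omega)
  have hTm : 'T' ∈ l := List.count_pos_iff.mp (by omega)
  have hplen : p < l.length := List.idxOf_lt_length_iff.mpr hPm
  have htlen : t < l.length := List.idxOf_lt_length_iff.mpr hTm
  have hpt2 : p + 2 ≤ t := by omega
  have hgt : l[t] = 'T' := List.getElem_idxOf htlen
  have hsplit : l = l.take t ++ 'T' :: l.drop (t + 1) := by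
    conv_lhs => rw [← List.take_append_drop t l]
    rw [List.drop_eq_getElem_cons htlen, hgt]
  have hcntT : l.count 'T' = (l.take t).count 'T' + (1 + (l.drop (t + 1)).count 'T') := by
    conv_lhs => rw [hsplit]
    simp [List.count_append]
    omega
  have hTtake : 'T' ∉ l.take t := List.count_eq_zero.mp (by omega)
  have hTdrop : 'T' ∉ l.drop (t + 1) := List.count_eq_zero.mp (by omega)
  have hulen : (l.take t).length = t := by rw [List.length_take]; omega
  have hup : (l.take t)[p]'(by omega) = 'P' := by
    rw [List.getElem_take]; exact List.getElem_idxOf hplen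
  have hPu : 'P' ∈ l.take t := by rw [← hup]; exact List.getElem_mem _
  have husplit : l.take t = (l.take t).take p ++ 'P' :: (l.take t).drop (p + 1) := by
    conv_lhs => rw [← List.take_append_drop p (l.take t)]
    rw [List.drop_eq_getElem_cons (by omega : p < (l.take t).length), hup]
  have hcntPl : l.count 'P' = (l.take t).count 'P' + (l.drop (t + 1)).count 'P' := by
    conv_lhs => rw [hsplit]
    simp [List.count_append]
  have hcntPu : (l.take t).count 'P'
      = ((l.take t).take p).count 'P' + (1 + ((l.take t).drop (p + 1)).count 'P') := by
    conv_lhs => rw [husplit]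
    simp [List.count_append]
    omega
  have hPge : 0 < (l.take t).count 'P' := List.count_pos_iff.mpr hPu
  have hq1 : ((l.take t).take p).count 'P' = 0 := by omega
  have hq2 : ((l.take t).drop (p + 1)).count 'P' = 0 := by omega
  have hq3 : (l.drop (t + 1)).count 'P' = 0 := by omega
  have allA : ∀ (seg : List Char), seg ⊆ l → 'P' ∉ seg → 'T' ∉ seg → ∀ c ∈ seg, c = 'A' := by
    intro seg hsub hnp hnt c hcmem
    rcases hall c (hsub hcmem) with h | h | h
    · exact h
    · exact absurd (h ▸ hcmem) hnp
    · exact absurd (h ▸ hcmem) hnt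
  have e1 : (l.take t).take p = List.replicate p 'A' := by
    have := List.eq_replicate_of_mem (allA _ ((List.take_subset _ _).trans (List.take_subset _ _))
      (List.count_eq_zero.mp hq1) (fun hm => hTtake (List.take_subset _ _ hm)))
    rwa [show ((l.take t).take p).length = p from by rw [List.length_take, hulen]; omega] at this
  have e2 : (l.take t).drop (p + 1) = List.replicate (t - p - 1) 'A' := by
    have := List.eq_replicate_of_mem (allA _ ((List.drop_subset _ _).trans (List.take_subset _ _))
      (List.count_eq_zero.mp hq2) (fun hm => hTtake (List.drop_subset _ _ hm)))
    rwa [show ((l.take t).drop (p + 1)).length = t - p - 1 from by rw [List.length_drop, hulen]; omega] at this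
  have e3 : l.drop (t + 1) = List.replicate (l.length - t - 1) 'A' := by
    have := List.eq_replicate_of_mem (allA _ (List.drop_subset _ _)
      (List.count_eq_zero.mp hq3) hTdrop)
    rwa [show (l.drop (t + 1)).length = l.length - t - 1 from by rw [List.length_drop]; omega] at this
  refine ⟨p, t - p - 1, l.length - t - 1, ?_, by omega, ?_⟩
  · conv_lhs => rw [hsplit]
    rw [husplit, e1, e2, e3]
    simp [List.append_assoc]
  · have hy : ((t - p - 1 : Nat) : Int) = (t : Int) - p - 1 := by omega
    have hzc : ((l.length - t - 1 : Nat) : Int) = (l.length : Int) - t - 1 := by omega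
    have key : ((l.length - t - 1 : Nat) : Int) = ((p * (t - p - 1) : Nat) : Int) := by
      rw [hzc, Nat.cast_mul, hy, hc]
    exact_mod_cast key

theorem B_yes_iff (s : String) : is_format_alt s = "YES" ↔ PatShape s.toList := by
  unfold is_format_alt
  dsimp only
  constructor
  · intro h
    split_ifs at h with h1 h2 h3
    · exact absurd h (by decide)
    · exact absurd h (by decide)
    · obtain ⟨hp1, ht1⟩ := not_or.mp h1
      obtain ⟨hpt, hany⟩ := not_or.mp h2
      have hall : ∀ ch ∈ s.toList, ch = 'A' ∨ ch = 'P' ∨ ch = 'T' := by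
        intro ch hch
        by_cases ha : ch = 'A'
        · exact Or.inl ha
        by_cases hpp : ch = 'P'
        · exact Or.inr (Or.inl hpp)
        exact Or.inr (Or.inr ((by simpa using hany : ∀ x ∈ s.toList, ¬x = 'A' → ¬x = 'P' → x = 'T') ch hch ha hpp))
      exact conds_pat _ (not_not.mp hp1) (not_not.mp ht1) hall h3.1 h3.2
    · exact absurd h (by decide)
  · rintro ⟨x, y, z, hl, hy, hz⟩
    have hcp : (s.toList).count 'P' = 1 := by
      rw [hl]; simp [List.count_append, List.count_replicate]
    have hct : (s.toList).count 'T' = 1 := by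
      rw [hl]; simp [List.count_append, List.count_replicate]
    have hip : (s.toList).idxOf 'P' = x := by
      rw [hl, idxOf_replA_append _ _ _ (by decide)]
      simp
    have hit : (s.toList).idxOf 'T' = x + y + 1 := by
      rw [hl, idxOf_replA_append _ _ _ (by decide),
        List.idxOf_cons_ne _ (by decide), idxOf_replA_append _ _ _ (by decide)]
      simp only [List.idxOf_cons_self]
      omega
    have hlen : (s.toList).length = x + y + z + 2 := by
      rw [hl]; simp; omega
    rw [if_neg, if_neg, if_pos]
    · rw [hip, hit, hlen]
      subst hz
      constructor
      · push_cast; omega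
      · push_cast; ring
    · intro hcon
      rcases hcon with hcon | hcon
      · rw [hip, hit] at hcon; push_cast at hcon; omega
      · rw [List.any_eq_true] at hcon
        obtain ⟨c, hcm, hcf⟩ := hcon
        rw [hl] at hcm
        simp only [List.mem_append, List.mem_cons, List.mem_replicate] at hcm
        rcases hcm with ⟨-, rfl⟩ | rfl | ⟨-, rfl⟩ | rfl | ⟨-, rfl⟩ <;> simp at hcf
    · rw [hcp, hct]; simp

theorem A_yes_or_no (s : String) : is_format s = "YES" ∨ is_format s = "NO" := by
  unfold is_format
  rcases isFmtLoop s.toList 0 0 0 0 with _ | ⟨p, a, b, c⟩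
  · right; rfl
  · dsimp only
    split_ifs
    · left; rfl
    · right; rfl

theorem B_yes_or_no (s : String) : is_format_alt s = "YES" ∨ is_format_alt s = "NO" := by
  unfold is_format_alt
  dsimp only
  split_ifs
  · right; rfl
  · right; rfl
  · left; rfl
  · right; rfl

-- ===== VERDICT (by name: the statement is the Claim_ definition above) =====
theorem is_format_spec : Claim_equal_is_format := by
  intro s _
  unfold Spec_is_format
  rcases A_yes_or_no s with hA | hA <;> rcases B_yes_or_no s with hB | hB
  · rw [hA, hB]
  · exact absurd ((B_yes_iff s).2 ((A_yes_iff s).1 hA)) (by simp [hB])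
  · exact absurd ((A_yes_iff s).2 ((B_yes_iff s).1 hB)) (by simp [hA])
  · rw [hA, hB]
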